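-- pv_equiv track=rewrite | github.com/miliar/Code_Jam_Webscraper | solutions_python/Problem_157/693.py | searchFrontFor
-- ===== SOURCE A (Python) =====
-- def searchFrontFor(strIn, val, minLength):
--     curVal = strIn[0]
--     for x in range(1, len(strIn)):
--         if curVal == val and x > minLength:
--             return strIn[x:],x
--         curVal = mult(curVal,strIn[x])
--     if curVal == val and len(strIn) > minLength:
--             return "",len(strIn)
--     return "FAIL",0
--
-- def mult(val1,val2):
--     if val1 == '1':
--         if val2 == '1':
--             return '1'
--         elif val2 == 'i':
--             return 'i'
--         elif val2 == 'j':
--             return 'j'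
--         elif val2 == 'k':
--             return 'k'
--
--     elif val1 == 'i':
--         if val2 == '1':
--             return 'i'
--         elif val2 == 'i':
--             return '-1'
--         elif val2 == 'j':
--             return 'k'
--         elif val2 == 'k':
--             return '-j'
--
--     elif val1 == 'j':
--         if val2 == '1':
--             return 'j'
--         elif val2 == 'i':
--             return '-k'
--         elif val2 == 'j':
--             return '-1'
--         elif val2 == 'k':
--             return 'i'
--
--     elif val1 == 'k':
--         if val2 == '1':
--             return 'k'
--         elif val2 == 'i':
--             return 'j'
--         elif val2 == 'j':
--             return '-i'
--         elif val2 == 'k':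
--             return '-1'
--
--     elif val1 == '-1':
--         if val2 == '1':
--             return '-1'
--         elif val2 == 'i':
--             return '-i'
--         elif val2 == 'j':
--             return '-j'
--         elif val2 == 'k':
--             return '-k'
--
--     elif val1 == '-i':
--         if val2 == '1':
--             return '-i'
--         elif val2 == 'i':
--             return '1'
--         elif val2 == 'j':
--             return '-k'
--         elif val2 == 'k':
--             return 'j'
--
--     elif val1 == '-j':
--         if val2 == '1':
--             return '-j'
--         elif val2 == 'i':
--             return 'k'
--         elif val2 == 'j':
--             return '1'
--         elif val2 == 'k':
--             return '-i'
--
--     elif val1 == '-k':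
--         if val2 == '1':
--             return '-k'
--         elif val2 == 'i':
--             return '-j'
--         elif val2 == 'j':
--             return 'i'
--         elif val2 == 'k':
--             return '1'
-- ===== SOURCE B (Python) =====
-- # Quaternion product via closed-form (sign, basis) arithmetic instead of a 16-branch
-- # lookup table; builds the list of prefix products first, then scans it for the cutoff.
--
-- def _enc(c):
--     if c == '1':
--         return (1, 0)
--     if c == 'i':
--         return (1, 1)
--     if c == 'j':
--         return (1, 2)
--     return (1, 3) if c == 'k' else None
--
-- def _qmul(q1, q2):
--     s1, b1 = q1
--     s2, b2 = q2
--     s = s1 * s2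
--     if b1 == 0:
--         b = b2
--     elif b2 == 0:
--         b = b1
--     elif b1 == b2:
--         s, b = -s, 0
--     else:
--         b = 6 - b1 - b2           # the remaining basis among {1,2,3}
--         if b2 != b1 % 3 + 1:      # not in cyclic order i->j->k->i
--             s = -s
--     return (s, b)
--
-- def _dec(q):
--     s, b = q
--     c = '1' if b == 0 else 'i' if b == 1 else 'j' if b == 2 else 'k'
--     return '-' + c if s < 0 else c
--
-- def searchFrontFor(strIn, val, minLength):
--     c0 = strIn[0]
--     cur = _enc(c0)
--     prefs = [c0 if cur is None else _dec(cur)]   # prefs[t] = product of strIn[:t+1]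
--     for c in strIn[1:]:
--         e = _enc(c)
--         cur = _qmul(cur, e) if cur is not None and e is not None else None
--         prefs.append(None if cur is None else _dec(cur))
--     x = 1
--     while x < len(prefs):
--         if prefs[x - 1] == val and x > minLength:
--             return strIn[x:], x
--         x += 1
--     if prefs[x - 1] == val and x > minLength:
--         return '', x
--     return 'FAIL', 0
-- ===== Notes on version B (the rewrite author's own statement) =====
-- stated objective: alternative
-- what changed: Replaced the 16-branch quaternion lookup table by closed-form (sign, basis-index) arithmetic with the cyclic i*j=k rule, and restructured the search to first build the full list of prefix products and then scan it for the first cutoff index past minLength.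
import Mathlib
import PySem

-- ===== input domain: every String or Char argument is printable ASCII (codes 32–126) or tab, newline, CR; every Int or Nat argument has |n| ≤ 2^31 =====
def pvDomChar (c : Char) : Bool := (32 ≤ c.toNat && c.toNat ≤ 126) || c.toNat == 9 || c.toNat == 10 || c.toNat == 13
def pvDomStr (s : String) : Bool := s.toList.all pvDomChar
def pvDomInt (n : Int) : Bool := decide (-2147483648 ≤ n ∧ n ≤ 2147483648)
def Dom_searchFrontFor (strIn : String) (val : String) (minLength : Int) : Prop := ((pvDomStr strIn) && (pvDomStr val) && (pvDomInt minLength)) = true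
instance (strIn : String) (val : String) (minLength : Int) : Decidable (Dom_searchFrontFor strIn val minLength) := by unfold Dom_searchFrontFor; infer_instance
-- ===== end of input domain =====

-- B changes A's 16-branch multiplication table into closed-form (sign, basis) quaternion
-- arithmetic and builds the prefix-product list before scanning it (objective: alternative).

-- ===== PORT A =====
-- Python mult(val1, val2): val1 is curVal (a product label, or None once poisoned: mult
-- returning None on unmatched input); val2 is always the single character strIn[x], so its
-- string comparisons are ported as Char comparisons (exact: all compared literals are 1 char).
def multA (val1 : Option String) (val2 : Char) : Option String :=
  if val1 = some "1" then
    (if val2 = '1' then some "1" else if val2 = 'i' then some "i"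
     else if val2 = 'j' then some "j" else if val2 = 'k' then some "k" else none)
  else if val1 = some "i" then
    (if val2 = '1' then some "i" else if val2 = 'i' then some "-1"
     else if val2 = 'j' then some "k" else if val2 = 'k' then some "-j" else none)
  else if val1 = some "j" then
    (if val2 = '1' then some "j" else if val2 = 'i' then some "-k"
     else if val2 = 'j' then some "-1" else if val2 = 'k' then some "i" else none)
  else if val1 = some "k" then
    (if val2 = '1' then some "k" else if val2 = 'i' then some "j"
     else if val2 = 'j' then some "-i" else if val2 = 'k' then some "-1" else none)
  else if val1 = some "-1" then
    (if val2 = '1' then some "-1" else if val2 = 'i' then some "-i"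
     else if val2 = 'j' then some "-j" else if val2 = 'k' then some "-k" else none)
  else if val1 = some "-i" then
    (if val2 = '1' then some "-i" else if val2 = 'i' then some "1"
     else if val2 = 'j' then some "-k" else if val2 = 'k' then some "j" else none)
  else if val1 = some "-j" then
    (if val2 = '1' then some "-j" else if val2 = 'i' then some "k"
     else if val2 = 'j' then some "1" else if val2 = 'k' then some "-i" else none)
  else if val1 = some "-k" then
    (if val2 = '1' then some "-k" else if val2 = 'i' then some "-j"
     else if val2 = 'j' then some "i" else if val2 = 'k' then some "1" else none)
  else none

-- the for-loop of A: rem = strIn[x:], curVal = product of strIn[:x]; at rem = [] the final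
-- check (x = len(strIn) there, so 'len(strIn) > minLength' is 'x > minLength').
def goA (chars : List Char) (val : String) (minLength : Int) :
    Option String → Int → List Char → String × Int
  | cur, x, [] =>
      if cur = some val ∧ x > minLength then ("", x) else ("FAIL", 0)
  | cur, x, c :: cs =>
      -- strIn[x:] with 1 ≤ x < len: exactly drop x
      if cur = some val ∧ x > minLength then (String.ofList (chars.drop x.toNat), x)
      else goA chars val minLength (multA cur c) (x + 1) cs

def searchFrontFor (strIn : String) (val : String) (minLength : Int) : String × Int :=
  match strIn.toList with
  | [] => ("FAIL", 0)  -- Python raises IndexError here; excluded by Pre_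
  | c :: rest => goA (c :: rest) val minLength (some (String.ofList [c])) 1 rest

-- ===== PORT B =====
def encB (c : Char) : Option (Int × Int) :=
  if c = '1' then some (1, 0)
  else if c = 'i' then some (1, 1)
  else if c = 'j' then some (1, 2)
  else if c = 'k' then some (1, 3) else none

def qmulB (q1 q2 : Int × Int) : Int × Int :=
  let s := q1.1 * q2.1
  if q1.2 = 0 then (s, q2.2)
  else if q2.2 = 0 then (s, q1.2)
  else if q1.2 = q2.2 then (-s, 0)
  else
    let b := 6 - q1.2 - q2.2
    if q2.2 ≠ q1.2 % 3 + 1 then (-s, b) else (s, b)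

def decB (q : Int × Int) : String :=
  let c : String := if q.2 = 0 then "1" else if q.2 = 1 then "i" else if q.2 = 2 then "j" else "k"
  if q.1 < 0 then "-" ++ c else c

def stepB (cur : Option (Int × Int)) (c : Char) : Option (Int × Int) :=
  match cur, encB c with
  | some a, some e => some (qmulB a e)
  | _, _ => none

-- the prefs-building for-loop: one Option String entry per remaining character
def buildB : Option (Int × Int) → List Char → List (Option String)
  | _, [] => []
  | cur, c :: cs =>
      let cur' := stepB cur c
      (Option.map decB cur') :: buildB cur' cs

-- the scanning while-loop: x is the index of the head of prefs plus one
def scanB (chars : List Char) (val : String) (minLength : Int) :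
    Int → List (Option String) → String × Int
  | x, p :: q :: rest =>
      if p = some val ∧ x > minLength then (String.ofList (chars.drop x.toNat), x)
      else scanB chars val minLength (x + 1) (q :: rest)
  | x, [p] =>
      if p = some val ∧ x > minLength then ("", x) else ("FAIL", 0)
  | _, [] => ("FAIL", 0)  -- unreachable: prefs is nonempty

def searchFrontFor_alt (strIn : String) (val : String) (minLength : Int) : String × Int :=
  match strIn.toList with
  | [] => ("FAIL", 0)  -- Python raises IndexError here; excluded by Pre_
  | c :: rest =>
      let cur0 := encB c
      let p0 : Option String :=
        match cur0 with
        | none => some (String.ofList [c])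
        | some q => some (decB q)
      scanB (c :: rest) val minLength 1 (p0 :: buildB cur0 rest)

-- ===== PRECONDITION & SPEC =====
-- Pre_ excludes only the empty string, on which Python A raises IndexError at strIn[0].
def Pre_searchFrontFor (strIn : String) (val : String) (minLength : Int) : Prop := strIn ≠ ""
instance (strIn : String) (val : String) (minLength : Int) : Decidable (Pre_searchFrontFor strIn val minLength) := by unfold Pre_searchFrontFor; infer_instance

def pvWitness_searchFrontFor : String × String × Int := ("ij", "k", 0)

def Spec_searchFrontFor (strIn : String) (val : String) (minLength : Int) (out : String × Int) : Prop := out = searchFrontFor_alt strIn val minLength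
instance (strIn : String) (val : String) (minLength : Int) (out : String × Int) : Decidable (Spec_searchFrontFor strIn val minLength out) := by unfold Spec_searchFrontFor; infer_instance

-- ===== CLAIM (what is proved, stated in full; the proofs are below) =====
def Claim_equal_searchFrontFor : Prop := ∀ (strIn : String) (val : String) (minLength : Int), Dom_searchFrontFor strIn val minLength → Pre_searchFrontFor strIn val minLength → Spec_searchFrontFor strIn val minLength (searchFrontFor strIn val minLength)

-- ===== LEMMAS AND PROOFS =====

-- A's trace of curVal values: the value compared at index x, for x = 1 .. len
def traceA (val : String) : Option String → List Char → List (Option String)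
  | cur, [] => [cur]
  | cur, c :: cs => cur :: traceA val (multA cur c) cs

def L8 : List (Int × Int) :=
  [(1,0),(1,1),(1,2),(1,3),(-1,0),(-1,1),(-1,2),(-1,3)]

lemma multA_none (c : Char) : multA none c = none := by simp [multA]

lemma multA_step (q : Int × Int) (hq : q ∈ L8) (c : Char) :
    multA (some (decB q)) c = Option.map (fun e => decB (qmulB q e)) (encB c) := by
  by_cases h1 : c = '1'
  · subst h1; fin_cases hq <;> decide
  · by_cases h2 : c = 'i'
    · subst h2; fin_cases hq <;> decide
    · by_cases h3 : c = 'j'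
      · subst h3; fin_cases hq <;> decide
      · by_cases h4 : c = 'k'
        · subst h4; fin_cases hq <;> decide
        · have he : encB c = none := by simp [encB, h1, h2, h3, h4]
          rw [he]
          fin_cases hq <;> simp [multA, decB, h1, h2, h3, h4]

lemma qmulB_mem (q : Int × Int) (hq : q ∈ L8) (e : Int × Int)
    (he : e ∈ [((1:Int),(0:Int)),(1,1),(1,2),(1,3)]) : qmulB q e ∈ L8 := by
  fin_cases hq <;> fin_cases he <;> decide

lemma encB_mem (c : Char) (e : Int × Int) (h : encB c = some e) :
    e ∈ [((1:Int),(0:Int)),(1,1),(1,2),(1,3)] := by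
  unfold encB at h
  split_ifs at h <;> simp_all

lemma multA_raw (c0 : Char) (h1 : c0 ≠ '1') (h2 : c0 ≠ 'i') (h3 : c0 ≠ 'j')
    (h4 : c0 ≠ 'k') (c : Char) : multA (some (String.ofList [c0])) c = none := by
  have e1 : String.ofList [c0] ≠ "1" := fun he => h1 (by simpa using String.toList_inj.mpr he)
  have e2 : String.ofList [c0] ≠ "i" := fun he => h2 (by simpa using String.toList_inj.mpr he)
  have e3 : String.ofList [c0] ≠ "j" := fun he => h3 (by simpa using String.toList_inj.mpr he)
  have e4 : String.ofList [c0] ≠ "k" := fun he => h4 (by simpa using String.toList_inj.mpr he)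
  have e5 : String.ofList [c0] ≠ "-1" := fun he => by
    have := String.toList_inj.mpr he; simp at this
  have e6 : String.ofList [c0] ≠ "-i" := fun he => by
    have := String.toList_inj.mpr he; simp at this
  have e7 : String.ofList [c0] ≠ "-j" := fun he => by
    have := String.toList_inj.mpr he; simp at this
  have e8 : String.ofList [c0] ≠ "-k" := fun he => by
    have := String.toList_inj.mpr he; simp at this
  simp [multA, e1, e2, e3, e4, e5, e6, e7, e8]

lemma traceA_none (val : String) (rest : List Char) :
    traceA val none rest = none :: buildB none rest := by
  induction rest with
  | nil => simp [traceA, buildB]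
  | cons c cs ih => simp [traceA, buildB, multA_none, stepB, ih]

lemma traceA_valid (val : String) (rest : List Char) :
    ∀ q ∈ L8, traceA val (some (decB q)) rest = some (decB q) :: buildB (some q) rest := by
  induction rest with
  | nil => intro q _; simp [traceA, buildB]
  | cons c cs ih =>
    intro q hq
    rw [traceA, multA_step q hq c]
    cases he : encB c with
    | none =>
      simp only [Option.map_none]
      rw [traceA_none]
      simp [buildB, stepB, he]
    | some e =>
      simp only [Option.map_some]
      rw [ih (qmulB q e) (qmulB_mem q hq e (encB_mem c e he))]
      simp [buildB, stepB, he]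

lemma traceA_raw (val : String) (rest : List Char) (c0 : Char) (h1 : c0 ≠ '1')
    (h2 : c0 ≠ 'i') (h3 : c0 ≠ 'j') (h4 : c0 ≠ 'k') :
    traceA val (some (String.ofList [c0])) rest
      = some (String.ofList [c0]) :: buildB none rest := by
  cases rest with
  | nil => simp [traceA, buildB]
  | cons c cs =>
    rw [traceA, multA_raw c0 h1 h2 h3 h4 c, traceA_none]
    simp [buildB, stepB]

lemma traceA_ne_nil (val : String) (cur : Option String) (rem : List Char) :
    traceA val cur rem ≠ [] := by
  cases rem <;> simp [traceA]

lemma goA_eq_scan (chars : List Char) (val : String) (minLength : Int) :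
    ∀ (rem : List Char) (cur : Option String) (x : Int),
      goA chars val minLength cur x rem = scanB chars val minLength x (traceA val cur rem) := by
  intro rem
  induction rem with
  | nil => intro cur x; rfl
  | cons c cs ih =>
    intro cur x
    rw [traceA]
    rcases h : traceA val (multA cur c) cs with _ | ⟨p, t⟩
    · exact absurd h (traceA_ne_nil val _ cs)
    · rw [goA, scanB, ih (multA cur c) (x + 1), h]

lemma toList_ne_nil (s : String) (h : s ≠ "") : s.toList ≠ [] := by
  intro hl
  exact h (String.toList_inj.mp (by simp [hl]))

-- ===== VERDICT (by name: the statement is the Claim_ definition above) =====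
theorem searchFrontFor_spec : Claim_equal_searchFrontFor := by
  intro strIn val minLength _ hpre
  unfold Spec_searchFrontFor searchFrontFor searchFrontFor_alt
  cases hl : strIn.toList with
  | nil => exact absurd hl (toList_ne_nil strIn hpre)
  | cons c rest =>
    simp only
    rw [goA_eq_scan]
    by_cases h1 : c = '1'
    · subst h1; rw [show (String.ofList ['1']) = decB (1,0) from rfl,
        traceA_valid val rest (1,0) (by decide)]; rfl
    · by_cases h2 : c = 'i'
      · subst h2; rw [show (String.ofList ['i']) = decB (1,1) from rfl,
          traceA_valid val rest (1,1) (by decide)]; rfl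
      · by_cases h3 : c = 'j'
        · subst h3; rw [show (String.ofList ['j']) = decB (1,2) from rfl,
            traceA_valid val rest (1,2) (by decide)]; rfl
        · by_cases h4 : c = 'k'
          · subst h4; rw [show (String.ofList ['k']) = decB (1,3) from rfl,
              traceA_valid val rest (1,3) (by decide)]; rfl
          · rw [traceA_raw val rest c h1 h2 h3 h4]
            simp [encB, h1, h2, h3, h4]
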